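-- pv_equiv track=rewrite | github.com/FabianJuarez182/Data_Encryption | Ejercicios/EjercicioCriptografia/Parte 2/XORtoBINARY.py | aplicar_xor
-- ===== SOURCE A (Python) =====
-- def validar_binario(binario):
--     # Eliminar espacios si existen
--     binario = binario.replace(" ", "")
--
--     # Verificar que solo contenga 0s y 1s
--     if not all(bit in '01' for bit in binario):
--         raise ValueError("El texto debe contener solo 0s y 1s")
--
--     return binario
--
-- def igualar_longitud(bin1, bin2):
--     # Encontrar la longitud máxima
--     max_len = max(len(bin1), len(bin2))
--
--     # Rellenar con ceros a la izquierda si es necesario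
--     bin1 = bin1.zfill(max_len)
--     bin2 = bin2.zfill(max_len)
--
--     return bin1, bin2
--
-- def aplicar_xor(bin1, bin2):
--     try:
--         # Validar y limpiar las entradas
--         bin1 = validar_binario(bin1)
--         bin2 = validar_binario(bin2)
--
--         # Igualar longitudes
--         bin1, bin2 = igualar_longitud(bin1, bin2)
--
--         # Lista para almacenar el resultado
--         resultado = []
--
--         # Aplicar XOR bit a bit
--         for b1, b2 in zip(bin1, bin2):
--             # XOR: 1 si los bits son diferentes, 0 si son iguales
--             xor_bit = '1' if b1 != b2 else '0'
--             resultado.append(xor_bit)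
--
--         # Convertir a string y agrupar en bytes (8 bits)
--         resultado_str = ''.join(resultado)
--         resultado_agrupado = ' '.join(resultado_str[i:i+8]
--                                     for i in range(0, len(resultado_str), 8))
--
--         return resultado_agrupado
--
--     except ValueError as e:
--         return f"Error: {str(e)}"
-- ===== SOURCE B (Python) =====
-- def aplicar_xor(bin1, bin2):
--     b1 = bin1.replace(" ", "")
--     b2 = bin2.replace(" ", "")
--     if any(c not in '01' for c in b1) or any(c not in '01' for c in b2):
--         return "Error: El texto debe contener solo 0s y 1s"
--     n = max(len(b1), len(b2))
--     out = []
--     # single right-to-left pass: no padding, no slicing; spaces placed arithmetically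
--     for i in range(1, n + 1):
--         c1 = b1[-i] if i <= len(b1) else '0'
--         c2 = b2[-i] if i <= len(b2) else '0'
--         out.append('1' if c1 != c2 else '0')
--         if i < n and (n - i) % 8 == 0:
--             out.append(' ')
--     out.reverse()
--     return ''.join(out)
-- ===== Notes on version B (the rewrite author's own statement) =====
-- stated objective: alternative
-- what changed: replaces A's zfill-padding + zip + slice-and-join byte grouping with a single right-to-left pass over the unpadded strings that reads missing bits as '0', emits XOR bits, inserts the group spaces arithmetically ((n-i)%8==0) and builds the output back-to-front
import Mathlib
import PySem

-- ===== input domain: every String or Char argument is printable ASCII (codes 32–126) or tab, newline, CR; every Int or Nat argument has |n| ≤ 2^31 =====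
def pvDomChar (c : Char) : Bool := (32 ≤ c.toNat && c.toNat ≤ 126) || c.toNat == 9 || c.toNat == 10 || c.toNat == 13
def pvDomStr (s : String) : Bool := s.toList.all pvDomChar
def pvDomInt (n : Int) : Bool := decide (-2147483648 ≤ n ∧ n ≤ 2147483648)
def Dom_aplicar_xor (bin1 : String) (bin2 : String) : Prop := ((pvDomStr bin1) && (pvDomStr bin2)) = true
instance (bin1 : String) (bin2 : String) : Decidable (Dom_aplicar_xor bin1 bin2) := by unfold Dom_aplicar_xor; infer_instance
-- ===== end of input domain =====

-- B replaces A's zfill-padding + zip + slice/join byte grouping by a single right-to-left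
-- pass over the unpadded strings that places the group spaces arithmetically and builds the
-- output back-to-front (objective: alternative; return values proved equal on the whole domain).

-- ===== PORT A =====
def validar_binario (binario : String) : Option (List Char) :=
  -- binario.replace(" ", ""); raise ValueError ↦ none
  let b := (PySem.Str.replace binario " " "").toList
  if b.all (fun bit => PySem.Chars.isIn [bit] ['0', '1']) then some b else none

def igualar_longitud (bin1 bin2 : List Char) : List Char × List Char :=
  let maxLen : Int := max (bin1.length : Int) (bin2.length : Int)
  (PySem.Chars.zfill bin1 maxLen, PySem.Chars.zfill bin2 maxLen)

def aplicar_xor (bin1 : String) (bin2 : String) : String :=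
  match validar_binario bin1 with
  | none => "Error: El texto debe contener solo 0s y 1s"
  | some b1 =>
    match validar_binario bin2 with
    | none => "Error: El texto debe contener solo 0s y 1s"
    | some b2 =>
      let p := igualar_longitud b1 b2
      let resultado : List Char :=
        (p.1.zip p.2).foldl (fun acc bp => acc ++ [if bp.1 ≠ bp.2 then '1' else '0']) []
      let resultado_agrupado :=
        PySem.Chars.join [' ']
          ((PySem.List.pyRange 0 (resultado.length : Int) 8).map
            (fun i => PySem.List.slice resultado (some i) (some (i + 8))))
      String.ofList resultado_agrupado

-- ===== PORT B =====
def aplicar_xor_alt (bin1 : String) (bin2 : String) : String :=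
  let b1 := (PySem.Str.replace bin1 " " "").toList
  let b2 := (PySem.Str.replace bin2 " " "").toList
  if b1.any (fun c => !PySem.Chars.isIn [c] ['0', '1']) ||
     b2.any (fun c => !PySem.Chars.isIn [c] ['0', '1']) then
    "Error: El texto debe contener solo 0s y 1s"
  else
    let n : Int := max (b1.length : Int) (b2.length : Int)
    let out := (PySem.List.pyRange 1 (n + 1) 1).foldl
      (fun (acc : List Char) (i : Int) =>
        let c1 := if i ≤ (b1.length : Int) then PySem.List.pyGetD b1 (-i) '0' else '0'
        let c2 := if i ≤ (b2.length : Int) then PySem.List.pyGetD b2 (-i) '0' else '0'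
        let acc := acc ++ [if c1 ≠ c2 then '1' else '0']
        if i < n ∧ PySem.Int.mod (n - i) 8 = 0 then acc ++ [' '] else acc) []
    String.ofList out.reverse

-- ===== PRECONDITION & SPEC =====
def Spec_aplicar_xor (bin1 : String) (bin2 : String) (out : String) : Prop := out = aplicar_xor_alt bin1 bin2
instance (bin1 : String) (bin2 : String) (out : String) : Decidable (Spec_aplicar_xor bin1 bin2 out) := by unfold Spec_aplicar_xor; infer_instance

-- ===== CLAIM (what is proved, stated in full; the proofs are below) =====
def Claim_equal_aplicar_xor : Prop := ∀ (bin1 : String) (bin2 : String), Dom_aplicar_xor bin1 bin2 → Spec_aplicar_xor bin1 bin2 (aplicar_xor bin1 bin2)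

-- ===== LEMMAS AND PROOFS =====

theorem pv_foldl_eq_flatMap {α β : Type} (f : List β → α → List β) (blk : α → List β)
    (hf : ∀ acc i, f acc i = acc ++ blk i) :
    ∀ (l : List α) (init : List β), l.foldl f init = init ++ l.flatMap blk := by
  intro l
  induction l with
  | nil => intro init; simp
  | cons a l ih => intro init; simp [List.foldl_cons, hf, ih]

theorem pv_map_getD_range_take {α : Type} (l : List α) (d : α) (k : ℕ) (hk : k ≤ l.length) :
    (List.range k).map (fun j => l.getD j d) = l.take k := by
  apply List.ext_getElem
  · simp [Nat.min_eq_left hk]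
  · intro i h1 h2
    simp only [List.getElem_map, List.getElem_range, List.getElem_take]
    have : i < l.length := lt_of_lt_of_le (by simpa using h1) hk
    simp [List.getD_eq_getElem?_getD, List.getElem?_eq_getElem this]

theorem pv_getD_drop {α : Type} (l : List α) (d : α) (m j : ℕ) :
    (l.drop m).getD j d = l.getD (m + j) d := by
  simp [List.getD_eq_getElem?_getD, List.getElem?_drop]

theorem pv_slice8 (r : List Char) (a : ℕ) :
    PySem.List.slice r (some (0 + 8 * (a : Int))) (some (0 + 8 * (a : Int) + 8))
      = (r.drop (8 * a)).take 8 := by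
  have h1 : (0 + 8 * (a : Int)) = ((8 * a : ℕ) : Int) := by push_cast; ring
  have h2 : (0 + 8 * (a : Int) + 8) = ((8 * a + 8 : ℕ) : Int) := by push_cast; ring
  rw [h2, h1, PySem.List.slice_natCast]
  congr 1
  omega

theorem pv_chunks (r : List Char) :
    (PySem.List.pyRange 0 (r.length : Int) 8).map
      (fun i => PySem.List.slice r (some i) (some (i + 8)))
    = (List.range ((r.length + 7) / 8)).map (fun k => (r.drop (8 * k)).take 8) := by
  rw [PySem.List.pyRange_of_pos _ _ (by norm_num), List.map_map]
  have hcnt : (if (0:Int) < (r.length : Int) then (((r.length : Int) - 0 + 8 - 1) / 8).toNat else 0)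
      = (r.length + 7) / 8 := by split <;> omega
  rw [hcnt]
  exact List.map_congr_left (fun k _ => pv_slice8 r k)

theorem pv_flatMap_singleton {α β : Type} (l : List α) (f : α → β) :
    l.flatMap (fun x => [f x]) = l.map f := by
  induction l with
  | nil => rfl
  | cons a t ih => simp [ih]

theorem pv_join_cons (sep a : List Char) (l : List (List Char)) (hl : l ≠ []) :
    PySem.Chars.join sep (a :: l) = a ++ sep ++ PySem.Chars.join sep l := by
  cases l with
  | nil => exact absurd rfl hl
  | cons b t => simp [PySem.Chars.join, List.intercalate, List.intersperse]

theorem pv_core (r : List Char) :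
    PySem.Chars.join [' ']
      ((PySem.List.pyRange 0 (r.length : Int) 8).map
        (fun i => PySem.List.slice r (some i) (some (i + 8))))
    = (List.range r.length).flatMap
        (fun j => (if j ≠ 0 ∧ j % 8 = 0 then [' '] else []) ++ [r.getD j ' ']) := by
  rw [pv_chunks]
  suffices H : ∀ (N : ℕ) (r : List Char), r.length = N →
      PySem.Chars.join [' '] ((List.range ((r.length + 7) / 8)).map (fun k => (r.drop (8 * k)).take 8))
      = (List.range r.length).flatMap
          (fun j => (if j ≠ 0 ∧ j % 8 = 0 then [' '] else []) ++ [r.getD j ' ']) by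
    exact H _ r rfl
  intro N
  induction N using Nat.strong_induction_on with
  | _ N ih =>
    intro r hr
    by_cases hN0 : N = 0
    · have : r = [] := List.eq_nil_of_length_eq_zero (hr.trans hN0)
      subst this
      simp [PySem.Chars.join, List.intercalate]
    by_cases hN8 : N ≤ 8
    · -- single chunk
      have hc : (r.length + 7) / 8 = 1 := by omega
      rw [hc]
      have : List.range 1 = [0] := rfl
      rw [this]
      simp only [List.map_cons, List.map_nil, Nat.mul_zero, List.drop_zero]
      rw [List.take_of_length_le (by omega)]
      have hjoin : PySem.Chars.join [' '] [r] = r := by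
        simp [PySem.Chars.join, List.intercalate]
      rw [hjoin]
      rw [List.flatMap_congr (g := fun j => [r.getD j ' ']) (by
        intro x hx
        have : x < N := by simpa [hr] using List.mem_range.mp hx
        have : ¬ (x ≠ 0 ∧ x % 8 = 0) := by omega
        simp [this])]
      rw [pv_flatMap_singleton, pv_map_getD_range_take r ' ' r.length le_rfl, List.take_length]
    · -- N > 8 : peel the first 8-chunk
      set r' := r.drop 8 with hr'
      have hlen' : r'.length = N - 8 := by simp [hr', hr]
      have hc : (r.length + 7) / 8 = ((r'.length + 7) / 8) + 1 := by
        rw [hlen', hr]; omega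
      rw [hc, List.range_succ_eq_map, List.map_cons, List.map_map]
      simp only [Nat.mul_zero, List.drop_zero]
      have hrest : List.map ((fun k => (r.drop (8 * k)).take 8) ∘ Nat.succ) (List.range ((r'.length + 7) / 8))
          = List.map (fun k => (r'.drop (8 * k)).take 8) (List.range ((r'.length + 7) / 8)) := by
        apply List.map_congr_left
        intro k _
        simp only [Function.comp]
        rw [hr', List.drop_drop]
        congr 2
        omega
      rw [hrest]
      have hne : List.map (fun k => (r'.drop (8 * k)).take 8) (List.range ((r'.length + 7) / 8)) ≠ [] := by
        have : (r'.length + 7) / 8 ≠ 0 := by omega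
        simp [List.map_eq_nil_iff, List.range_eq_nil, this]
      rw [pv_join_cons _ _ _ hne]
      rw [ih (N - 8) (by omega) r' hlen']
      -- RHS: split range N
      rw [hr, show N = 8 + (N - 8) from by omega, List.range_add, List.flatMap_append, List.flatMap_map]
      have h1 : (List.range 8).flatMap
            (fun j => (if j ≠ 0 ∧ j % 8 = 0 then [' '] else []) ++ [r.getD j ' '])
          = r.take 8 := by
        rw [List.flatMap_congr (g := fun j => [r.getD j ' ']) (by
          intro x hx
          have : x < 8 := List.mem_range.mp hx
          have : ¬ (x ≠ 0 ∧ x % 8 = 0) := by omega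
          simp [this])]
        rw [pv_flatMap_singleton]
        exact pv_map_getD_range_take r ' ' 8 (by omega)
      rw [h1]
      have h2 : (List.range (N - 8)).flatMap
            (fun x => (if 8 + x ≠ 0 ∧ (8 + x) % 8 = 0 then [' '] else []) ++ [r.getD (8 + x) ' '])
          = [' '] ++ (List.range (r'.length)).flatMap
            (fun j => (if j ≠ 0 ∧ j % 8 = 0 then [' '] else []) ++ [r'.getD j ' ']) := by
        rw [hlen']
        have hpos : N - 8 = (N - 9) + 1 := by omega
        rw [hpos, List.range_succ_eq_map, List.flatMap_cons, List.flatMap_cons]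
        simp only [List.flatMap_map]
        have htail : (List.range (N - 9)).flatMap
              (fun x => (if 8 + Nat.succ x ≠ 0 ∧ (8 + Nat.succ x) % 8 = 0 then [' '] else [])
                ++ [r.getD (8 + Nat.succ x) ' '])
            = (List.range (N - 9)).flatMap
              (fun x => (if Nat.succ x ≠ 0 ∧ (Nat.succ x) % 8 = 0 then [' '] else [])
                ++ [r'.getD (Nat.succ x) ' ']) := by
          apply List.flatMap_congr
          intro x _
          have hiff : (8 + Nat.succ x ≠ 0 ∧ (8 + Nat.succ x) % 8 = 0) ↔ (Nat.succ x ≠ 0 ∧ (Nat.succ x) % 8 = 0) := by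
            omega
          rw [if_congr hiff rfl rfl, (pv_getD_drop r ' ' 8 (Nat.succ x)).symm]
        rw [htail]
        simp [hr']
      rw [h2]
      simp [List.append_assoc]


theorem pv_zfill_eq (cs : List Char) (w : Int)
    (h : ∀ c ∈ cs, c = '0' ∨ c = '1') (hw : (cs.length : Int) ≤ w) :
    PySem.Chars.zfill cs w = List.replicate (w.toNat - cs.length) '0' ++ cs := by
  unfold PySem.Chars.zfill
  split
  · have : w = (cs.length : Int) := le_antisymm (by assumption) hw
    simp [this]
  · match cs, h with
    | [], _ => simp
    | c :: rest, h =>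
      have hc : c = '0' ∨ c = '1' := h c (by simp)
      have : ¬ (c = '+' ∨ c = '-') := by rcases hc with h | h <;> simp [h]
      simp [this]

theorem pv_mod8 (a : ℕ) : PySem.Int.mod (a : Int) 8 = ((a % 8 : ℕ) : Int) := by
  simp [PySem.Int.mod, Int.fmod_eq_emod]

theorem pv_pyGetD_neg {α : Type} (xs : List α) (k : ℕ) (d : α) (h1 : 1 ≤ k) (h2 : k ≤ xs.length) :
    PySem.List.pyGetD xs (-(k:Int)) d = xs.getD (xs.length - k) d := by
  have hnonneg : ¬ (0 ≤ -(k:Int)) := by omega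
  have hge : -(xs.length : Int) ≤ -(k:Int) := by omega
  simp only [PySem.List.pyGetD, PySem.List.pyGet?, PySem.List.pyIdx?, if_neg hnonneg, if_pos hge,
    neg_neg, Int.toNat_natCast, Option.bind_some, List.getD_eq_getElem?_getD]

-- the bit B reads at right-offset N-j equals position j of the zfilled string
theorem pv_col (b : List Char) (N j : ℕ) (hLN : b.length ≤ N) (hj : j < N) :
    (if (((N-j : ℕ) : Int)) ≤ (b.length : Int) then PySem.List.pyGetD b (-((N-j : ℕ) : Int)) '0' else '0')
      = (List.replicate (N - b.length) '0' ++ b).getD j ' ' := by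
  by_cases hc : N - j ≤ b.length
  · have hk1 : 1 ≤ N - j := by omega
    rw [if_pos (by exact_mod_cast hc), pv_pyGetD_neg b (N-j) '0' hk1 hc]
    have hjL : (List.replicate (N - b.length) '0').length ≤ j := by simp; omega
    have hidx : j - (N - b.length) = b.length - (N - j) := by omega
    have hlt : b.length - (N - j) < b.length := by omega
    rw [List.getD_eq_getElem?_getD, List.getElem?_eq_getElem hlt]
    conv_rhs => rw [List.getD_eq_getElem?_getD, List.getElem?_append_right hjL]
    simp only [List.length_replicate]
    rw [hidx, List.getElem?_eq_getElem hlt]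
    rfl
  · have hjlt : j < N - b.length := by omega
    rw [if_neg (by exact_mod_cast hc)]
    rw [List.getD_eq_getElem?_getD, List.getElem?_append_left (by simpa using hjlt)]
    simp [hjlt]

-- the main computational lemma, on the cleaned strings
theorem pv_main (b1 b2 : List Char)
    (h1 : ∀ c ∈ b1, c = '0' ∨ c = '1') (h2 : ∀ c ∈ b2, c = '0' ∨ c = '1') :
    (let p := igualar_longitud b1 b2
     let resultado : List Char :=
       (p.1.zip p.2).foldl (fun acc bp => acc ++ [if bp.1 ≠ bp.2 then '1' else '0']) []
     String.ofList (PySem.Chars.join [' ']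
       ((PySem.List.pyRange 0 (resultado.length : Int) 8).map
         (fun i => PySem.List.slice resultado (some i) (some (i + 8))))))
    = (let n : Int := max (b1.length : Int) (b2.length : Int)
       let out := (PySem.List.pyRange 1 (n + 1) 1).foldl
         (fun (acc : List Char) (i : Int) =>
           let c1 := if i ≤ (b1.length : Int) then PySem.List.pyGetD b1 (-i) '0' else '0'
           let c2 := if i ≤ (b2.length : Int) then PySem.List.pyGetD b2 (-i) '0' else '0'
           let acc := acc ++ [if c1 ≠ c2 then '1' else '0']
           if i < n ∧ PySem.Int.mod (n - i) 8 = 0 then acc ++ [' '] else acc) []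
       String.ofList out.reverse) := by
  dsimp only [igualar_longitud]
  set L1 := b1.length with hL1
  set L2 := b2.length with hL2
  set N := max L1 L2 with hN
  have hcast : max (L1 : Int) (L2 : Int) = ((N : ℕ) : Int) := by rw [hN]; push_cast; rfl
  rw [hcast]
  have hz1 : PySem.Chars.zfill b1 ((N : ℕ) : Int) = List.replicate (N - L1) '0' ++ b1 := by
    rw [pv_zfill_eq b1 _ h1 (by exact_mod_cast le_max_left L1 L2)]
    simp [← hL1]
  have hz2 : PySem.Chars.zfill b2 ((N : ℕ) : Int) = List.replicate (N - L2) '0' ++ b2 := by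
    rw [pv_zfill_eq b2 _ h2 (by exact_mod_cast le_max_right L1 L2)]
    simp [← hL2]
  rw [hz1, hz2]
  set z1 := List.replicate (N - L1) '0' ++ b1 with hz1d
  set z2 := List.replicate (N - L2) '0' ++ b2 with hz2d
  have hlen1 : z1.length = N := by simp [hz1d]; omega
  have hlen2 : z2.length = N := by simp [hz2d]; omega
  -- A side: foldl is a map, then pv_core
  rw [pv_foldl_eq_flatMap (fun acc (bp : Char × Char) => acc ++ [if bp.1 ≠ bp.2 then '1' else '0'])
      (fun bp => [if bp.1 ≠ bp.2 then '1' else '0']) (fun _ _ => rfl)]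
  rw [List.nil_append, pv_flatMap_singleton]
  set r := (z1.zip z2).map (fun bp => if bp.1 ≠ bp.2 then '1' else '0') with hrd
  have hrlen : r.length = N := by simp [hrd, hlen1, hlen2]
  rw [pv_core r]
  -- B side: foldl is a flatMap
  rw [pv_foldl_eq_flatMap _
      (fun i => [if (if i ≤ (L1 : Int) then PySem.List.pyGetD b1 (-i) '0' else '0')
                    ≠ (if i ≤ (L2 : Int) then PySem.List.pyGetD b2 (-i) '0' else '0')
                 then '1' else '0']
        ++ (if i < ((N : ℕ) : Int) ∧ PySem.Int.mod (((N : ℕ) : Int) - i) 8 = 0 then [' '] else []))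
      (by intro acc i; dsimp only; split <;> simp)]
  rw [List.nil_append, List.reverse_flatMap]
  have hrange : (PySem.List.pyRange 1 (((N : ℕ) : Int) + 1) 1).reverse
      = (List.range N).map (fun j => (1 : Int) + ((N - 1 - j : ℕ) : Int)) := by
    rw [PySem.List.pyRange_one]
    have : (((N : ℕ) : Int) + 1 - 1).toNat = N := by omega
    rw [this, ← List.map_reverse, List.range_eq_range', List.reverse_range', List.map_map,
      ← List.range_eq_range']
    exact List.map_congr_left (fun x _ => by simp)
  rw [hrange, List.flatMap_map, hrlen]
  congr 1
  apply List.flatMap_congr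
  intro j hj
  have hjN : j < N := List.mem_range.mp hj
  simp only [Function.comp]
  have hi : (1 : Int) + ((N - 1 - j : ℕ) : Int) = ((N - j : ℕ) : Int) := by omega
  rw [hi]
  -- the space condition
  have hsub : ((N : ℕ) : Int) - ((N - j : ℕ) : Int) = ((j : ℕ) : Int) := by omega
  have hcond : (((N - j : ℕ) : Int) < ((N : ℕ) : Int) ∧
      PySem.Int.mod (((N : ℕ) : Int) - ((N - j : ℕ) : Int)) 8 = 0) ↔ (j ≠ 0 ∧ j % 8 = 0) := by
    rw [hsub, pv_mod8]
    constructor <;> intro h <;> refine ⟨by omega, by omega⟩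
  -- the digit
  have hcol1 : (if (((N - j : ℕ) : Int)) ≤ (L1 : Int) then PySem.List.pyGetD b1 (-((N - j : ℕ) : Int)) '0' else '0')
      = z1.getD j ' ' := pv_col b1 N j (le_max_left L1 L2) hjN
  have hcol2 : (if (((N - j : ℕ) : Int)) ≤ (L2 : Int) then PySem.List.pyGetD b2 (-((N - j : ℕ) : Int)) '0' else '0')
      = z2.getD j ' ' := pv_col b2 N j (le_max_right L1 L2) hjN
  have hjr : j < r.length := by omega
  have hj1 : j < z1.length := by omega
  have hj2 : j < z2.length := by omega
  have hrj : r.getD j ' ' = if z1.getD j ' ' ≠ z2.getD j ' ' then '1' else '0' := by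
    rw [List.getD_eq_getElem _ _ hjr, List.getD_eq_getElem _ _ hj1, List.getD_eq_getElem _ _ hj2]
    simp [hrd, List.getElem_zip]
  rw [hcol1, hcol2, hrj, List.reverse_append]
  by_cases hc : j ≠ 0 ∧ j % 8 = 0
  · rw [if_pos hc, if_pos (hcond.mpr hc)]; simp
  · rw [if_neg hc, if_neg (fun h => hc (hcond.mp h))]; simp

theorem pv_mem01 (c : Char) (h : PySem.Chars.isIn [c] ['0', '1'] = true) : c = '0' ∨ c = '1' := by
  have hinf : [c] <:+: ['0', '1'] := (PySem.Chars.isIn_iff_infix _ _).mp h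
  have hmem : c ∈ ['0', '1'] := List.singleton_sublist.mp hinf.sublist
  simpa using hmem

-- ===== VERDICT (by name: the statement is the Claim_ definition above) =====
theorem aplicar_xor_spec : Claim_equal_aplicar_xor := by
  intro bin1 bin2 _
  unfold Spec_aplicar_xor aplicar_xor aplicar_xor_alt validar_binario
  set c1 := (PySem.Str.replace bin1 " " "").toList with hc1
  set c2 := (PySem.Str.replace bin2 " " "").toList with hc2
  by_cases hA1 : c1.all (fun bit => PySem.Chars.isIn [bit] ['0', '1']) = true
  · by_cases hA2 : c2.all (fun bit => PySem.Chars.isIn [bit] ['0', '1']) = true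
    · have hB1 : c1.any (fun c => !PySem.Chars.isIn [c] ['0', '1']) = false := by
        rw [← Bool.not_eq_true', ← List.all_eq_not_any_not]; exact hA1
      have hB2 : c2.any (fun c => !PySem.Chars.isIn [c] ['0', '1']) = false := by
        rw [← Bool.not_eq_true', ← List.all_eq_not_any_not]; exact hA2
      simp only [if_pos hA1, if_pos hA2, hB1, hB2, Bool.or_self, Bool.false_eq_true, if_false]
      exact pv_main c1 c2
        (fun c hc => pv_mem01 c (by have := List.all_eq_true.mp hA1 c hc; simpa using this))
        (fun c hc => pv_mem01 c (by have := List.all_eq_true.mp hA2 c hc; simpa using this))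
    · have hB2 : c2.any (fun c => !PySem.Chars.isIn [c] ['0', '1']) = true := by
        rw [List.any_eq_not_all_not]
        simp only [Bool.not_not]
        simpa using hA2
      simp only [if_pos hA1, if_neg hA2, hB2, Bool.or_true, if_true]
  · have hB1 : c1.any (fun c => !PySem.Chars.isIn [c] ['0', '1']) = true := by
      rw [List.any_eq_not_all_not]
      simp only [Bool.not_not]
      simpa using hA1
    simp only [if_neg hA1, hB1, Bool.true_or, if_true]
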